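-- pv_equiv track=rewrite | github.com/nmashtakov/finflow | backend/transactions/views.py | _collect_column_samples
-- ===== SOURCE A (Python) =====
-- def _collect_column_samples(columns, sample_rows, limit=5):
--     samples = {}
--     for column in columns:
--         values = []
--         for row in sample_rows:
--             cell = row.get(column)
--             if cell is None:
--                 continue
--             text = str(cell).strip()
--             if text:
--                 values.append(text)
--             if len(values) >= limit:
--                 break
--         samples[column] = values
--     return samples
-- ===== SOURCE B (Python) =====
-- def _collect_column_samples(columns, sample_rows, limit=5):
--     # Row-major single pass: per-column (values, active) states, distributing
--     # each row's cells to the columns that are still collecting.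
--     states = [(column, [], True) for column in dict.fromkeys(columns)]
--     for row in sample_rows:
--         if not any(active for _, _, active in states):
--             break
--         next_states = []
--         for column, values, active in states:
--             if active:
--                 cell = row.get(column)
--                 if cell is not None:
--                     text = str(cell).strip()
--                     if text:
--                         values = values + [text]
--                     active = len(values) < limit
--             next_states.append((column, values, active))
--         states = next_states
--     return {column: values for column, values, _ in states}
-- ===== Notes on version B (the rewrite author's own statement) =====
-- stated objective: alternative
-- what changed: Replaced A's column-major traversal (one full scan of sample_rows per column with an early break) by a single row-major distributing pass over sample_rows that keeps an explicit (values, active) state per distinct column and stops once every column is full.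
import Mathlib
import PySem

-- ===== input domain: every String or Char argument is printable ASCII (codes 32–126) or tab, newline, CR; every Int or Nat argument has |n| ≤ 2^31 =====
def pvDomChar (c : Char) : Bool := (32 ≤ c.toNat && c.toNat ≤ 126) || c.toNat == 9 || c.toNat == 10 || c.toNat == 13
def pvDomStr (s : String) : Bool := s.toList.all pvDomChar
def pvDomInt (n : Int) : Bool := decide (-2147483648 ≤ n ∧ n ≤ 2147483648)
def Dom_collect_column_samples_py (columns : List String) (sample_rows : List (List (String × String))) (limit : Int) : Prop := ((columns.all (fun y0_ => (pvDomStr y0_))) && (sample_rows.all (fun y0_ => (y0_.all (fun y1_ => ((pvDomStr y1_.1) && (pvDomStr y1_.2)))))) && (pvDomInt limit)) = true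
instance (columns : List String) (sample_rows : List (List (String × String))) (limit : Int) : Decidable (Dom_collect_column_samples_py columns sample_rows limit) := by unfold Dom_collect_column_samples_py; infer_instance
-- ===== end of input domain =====

-- B replaces A's column-major per-column scans by one row-major distributing pass over
-- sample_rows with an explicit (values, active) state per distinct column (objective: alternative).

-- ===== PORT A =====
-- inner 'for row in sample_rows: … break' loop of A, for one column
def pvAloop (limit : Int) (column : String) :
    List (List (String × String)) → List String → List String
  | [], values => values
  | row :: rest, values =>
    match (PySem.Dict.mk row).get? column with
    | none => pvAloop limit column rest values
    | some cell =>
      let text := PySem.Str.strip cell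
      let values' := if text ≠ "" then values ++ [text] else values
      if (values'.length : Int) ≥ limit then values' else pvAloop limit column rest values'

def collect_column_samples_py (columns : List String) (sample_rows : List (List (String × String))) (limit : Int) : List (String × List String) :=
  (columns.foldl
    (fun samples column => samples.insert column (pvAloop limit column sample_rows []))
    (PySem.Dict.empty : PySem.Dict String (List String))).items

-- ===== PORT B =====
-- body of B's inner 'for column, values, active in states' loop, for one state triple
def pvBstep (limit : Int) (row : List (String × String)) (st : String × List String × Bool) :
    String × List String × Bool :=
  let (column, values, active) := st
  if active then
    match (PySem.Dict.mk row).get? column with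
    | none => (column, values, active)
    | some cell =>
      let text := PySem.Str.strip cell
      let values' := if text ≠ "" then values ++ [text] else values
      (column, values', decide ((values'.length : Int) < limit))
  else (column, values, active)

-- B's outer 'for row in sample_rows: … break' loop
def pvBloop (limit : Int) :
    List (List (String × String)) → List (String × List String × Bool) → List (String × List String × Bool)
  | [], states => states
  | row :: rest, states =>
    if states.any (fun st => st.2.2) = false then states
    else pvBloop limit rest (states.map (pvBstep limit row))

def collect_column_samples_py_alt (columns : List String) (sample_rows : List (List (String × String))) (limit : Int) : List (String × List String) :=
  let states := (PySem.List.dedup columns).map (fun column => (column, ([] : List String), true))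
  (pvBloop limit sample_rows states).map (fun st => (st.1, st.2.1))

-- ===== PRECONDITION & SPEC =====
def Spec_collect_column_samples_py (columns : List String) (sample_rows : List (List (String × String))) (limit : Int) (out : List (String × List String)) : Prop := out = collect_column_samples_py_alt columns sample_rows limit
instance (columns : List String) (sample_rows : List (List (String × String))) (limit : Int) (out : List (String × List String)) : Decidable (Spec_collect_column_samples_py columns sample_rows limit out) := by unfold Spec_collect_column_samples_py; infer_instance

-- ===== CLAIM (what is proved, stated in full; the proofs are below) =====
def Claim_equal_collect_column_samples_py : Prop := ∀ (columns : List String) (sample_rows : List (List (String × String))) (limit : Int), Dom_collect_column_samples_py columns sample_rows limit → Spec_collect_column_samples_py columns sample_rows limit (collect_column_samples_py columns sample_rows limit)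

-- ===== LEMMAS AND PROOFS =====

-- an inactive state is a fixed point of pvBstep
theorem pvBstep_inactive (limit : Int) (row : List (String × String)) (c : String) (vs : List String) :
    pvBstep limit row (c, vs, false) = (c, vs, false) := rfl

theorem foldl_pvBstep_inactive (limit : Int) (rows : List (List (String × String)))
    (c : String) (vs : List String) :
    rows.foldl (fun t row => pvBstep limit row t) (c, vs, false) = (c, vs, false) := by
  induction rows with
  | nil => rfl
  | cons row rest ih => simpa [pvBstep_inactive] using ih

-- B's outer loop is the per-state fold of pvBstep over all rows
theorem pvBloop_eq_map_foldl (limit : Int) (rows : List (List (String × String))) :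
    ∀ states : List (String × List String × Bool),
    pvBloop limit rows states = states.map (fun st => rows.foldl (fun t row => pvBstep limit row t) st) := by
  induction rows with
  | nil => intro states; simp [pvBloop]
  | cons row rest ih =>
    intro states
    by_cases h : states.any (fun st => st.2.2) = false
    · have hall : ∀ st ∈ states, st.2.2 = false := by
        intro st hst
        by_contra hne
        have : states.any (fun st => st.2.2) = true :=
          List.any_eq_true.mpr ⟨st, hst, by simpa using hne⟩
        simp [this] at h
      rw [pvBloop, if_pos h]
      symm
      have hid : ∀ st ∈ states,
          (fun st => (row :: rest).foldl (fun t row => pvBstep limit row t) st) st = id st := by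
        intro st hst
        obtain ⟨c, vs, a⟩ := st
        have : a = false := hall _ hst
        subst this
        simpa using foldl_pvBstep_inactive limit (row :: rest) c vs
      rw [List.map_congr_left hid, List.map_id]
  -- active branch: peel one row, apply the IH, fuse the two maps
    · rw [pvBloop, if_neg h, ih, List.map_map]
      simp [List.foldl_cons, Function.comp]

-- per column, B's fold over rows computes exactly A's inner loop
theorem foldl_pvBstep_active (limit : Int) (c : String) (rows : List (List (String × String))) :
    ∀ acc : List String,
    rows.foldl (fun t row => pvBstep limit row t) (c, acc, true)
      = (c, pvAloop limit c rows acc,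
          (rows.foldl (fun t row => pvBstep limit row t) (c, acc, true)).2.2) := by
  induction rows with
  | nil => intro acc; simp [pvAloop]
  | cons row rest ih =>
    intro acc
    rw [List.foldl_cons]
    cases hg : (PySem.Dict.mk row).get? c with
    | none =>
      rw [show pvBstep limit row (c, acc, true) = (c, acc, true) by simp [pvBstep, hg]]
      rw [ih acc]
      simp [pvAloop, hg]
    | some cell =>
      by_cases hts : PySem.Str.strip cell = ""
      · have hstep : pvBstep limit row (c, acc, true)
            = (c, acc, decide ((acc.length : Int) < limit)) := by
          simp [pvBstep, hg, hts]
        rw [hstep]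
        by_cases hlim : (acc.length : Int) ≥ limit
        · have hdec : decide ((acc.length : Int) < limit) = false := by simp; omega
          rw [hdec, foldl_pvBstep_inactive]
          have hlim' : ¬ ((acc.length : Int) < limit) := by omega
          simp [pvAloop, hg, hts, hlim']
        · have hdec : decide ((acc.length : Int) < limit) = true := by simp; omega
          rw [hdec, ih acc]
          have hlim' : ((acc.length : Int) < limit) := by omega
          simp [pvAloop, hg, hts, hlim']
      · have hstep : pvBstep limit row (c, acc, true)
            = (c, acc ++ [PySem.Str.strip cell],
                decide (((acc ++ [PySem.Str.strip cell]).length : Int) < limit)) := by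
          simp [pvBstep, hg, hts]
        rw [hstep]
        by_cases hlim : ((acc ++ [PySem.Str.strip cell]).length : Int) ≥ limit
        · have hdec : decide (((acc ++ [PySem.Str.strip cell]).length : Int) < limit) = false := by
            simp at hlim ⊢; omega
          rw [hdec, foldl_pvBstep_inactive]
          have hlim' : ¬ ((acc.length : Int) + 1 < limit) := by simp at hlim; omega
          simp [pvAloop, hg, hts, hlim']
        · have hdec : decide (((acc ++ [PySem.Str.strip cell]).length : Int) < limit) = true := by
            simp at hlim ⊢; omega
          rw [hdec, ih (acc ++ [PySem.Str.strip cell])]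
          have hlim' : ((acc.length : Int) + 1 < limit) := by simp at hlim; omega
          simp [pvAloop, hg, hts, hlim']

-- lookup in A's insert-fold: every column in the list maps to A's inner-loop value
theorem get?_foldl_insert_aloop (limit : Int) (rows : List (List (String × String))) (k : String) :
    ∀ (cols : List String) (d : PySem.Dict String (List String)),
    (cols.foldl (fun samples column => samples.insert column (pvAloop limit column rows [])) d).get? k
      = if k ∈ cols then some (pvAloop limit k rows []) else d.get? k := by
  intro cols
  induction cols with
  | nil => intro d; simp
  | cons c cs ih =>
    intro d
    rw [List.foldl_cons, ih]
    by_cases hk : k ∈ cs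
    · simp [hk]
    · by_cases hkc : k = c
      · subst hkc; simp [hk, PySem.Dict.get?_insert_self]
      · simp [hk, hkc, PySem.Dict.get?_insert_of_ne _ _ hkc]

-- A's result as a map over the deduplicated columns
theorem collect_column_samples_py_eq_map (columns : List String)
    (sample_rows : List (List (String × String))) (limit : Int) :
    collect_column_samples_py columns sample_rows limit
      = (PySem.List.dedup columns).map (fun c => (c, pvAloop limit c sample_rows [])) := by
  unfold collect_column_samples_py
  set d := columns.foldl
      (fun samples column => samples.insert column (pvAloop limit column sample_rows []))
      (PySem.Dict.empty : PySem.Dict String (List String)) with hd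
  have hnd : d.keys.Nodup := by
    rw [hd]; exact PySem.Dict.nodup_keys_foldl_insert _ _ _ PySem.Dict.nodup_keys_empty
  have hkeys : d.keys = PySem.List.dedup columns := by
    rw [hd, PySem.Dict.keys_foldl_insert]
    simp [PySem.Set.update, PySem.Set.ofList_eq_foldl, PySem.Dict.keys_empty]
  rw [PySem.Dict.items_eq_map_keys d hnd ([] : List String), hkeys]
  apply List.map_congr_left
  intro c hc
  have hcmem : c ∈ columns := (PySem.List.mem_dedup _ _).mp hc
  have : d.get? c = some (pvAloop limit c sample_rows []) := by
    rw [hd, get?_foldl_insert_aloop]; simp [hcmem]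
  simp [PySem.Dict.getD_eq_get?_getD, this]

-- B's result as the same map
theorem collect_column_samples_py_alt_eq_map (columns : List String)
    (sample_rows : List (List (String × String))) (limit : Int) :
    collect_column_samples_py_alt columns sample_rows limit
      = (PySem.List.dedup columns).map (fun c => (c, pvAloop limit c sample_rows [])) := by
  show ((pvBloop limit sample_rows
      ((PySem.List.dedup columns).map (fun column => (column, ([] : List String), true)))).map
        (fun st => (st.1, st.2.1)))
    = (PySem.List.dedup columns).map (fun c => (c, pvAloop limit c sample_rows []))
  rw [pvBloop_eq_map_foldl, List.map_map, List.map_map]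
  apply List.map_congr_left
  intro c _
  simp only [Function.comp]
  rw [foldl_pvBstep_active limit c sample_rows []]

-- ===== VERDICT (by name: the statement is the Claim_ definition above) =====
theorem collect_column_samples_py_spec : Claim_equal_collect_column_samples_py := by
  intro columns sample_rows limit _
  unfold Spec_collect_column_samples_py
  rw [collect_column_samples_py_eq_map, collect_column_samples_py_alt_eq_map]
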